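-- pv_equiv track=rewrite | github.com/pspiagicw/uranus | exp/q3.py | solve
-- ===== SOURCE A (Python) =====
-- def solve(A, B):
--     results = list()
--
--     for query in B:
--         left = (query - 1) - 1
--         right = (query-1) + 1
--         count = 1
--         while left >= 0 and right < len(A):
--             if A[left] == A[right]:
--                 left -= 1
--                 right += 1
--                 count += 2
--
--             else:
--                 break
--
--         results.append(count)
--     return results
-- ===== SOURCE B (Python) =====
-- def solve(A, B):
--     n = len(A)
--     # Manacher: d[i] = number of odd palindromes centered at i (= radius + 1)
--     d = [0] * n
--     l, r = 0, -1
--     for i in range(n):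
--         k = 1 if i > r else min(d[l + r - i], r - i + 1)
--         while k <= i and i + k < n and A[i - k] == A[i + k]:
--             k += 1
--         d[i] = k
--         if i + k - 1 > r:
--             l, r = i - k + 1, i + k - 1
--     return [2 * d[q - 1] - 1 if 1 <= q <= n else 1 for q in B]
-- ===== Notes on version B (the rewrite author's own statement) =====
-- stated objective: alternative
-- what changed: B runs Manacher's algorithm once over A to precompute the odd-palindrome count for every center (O(n+|B|) total), then answers each query by a table lookup, instead of A's fresh expansion loop per query (O(|B|*n) worst case).
import Mathlib
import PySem

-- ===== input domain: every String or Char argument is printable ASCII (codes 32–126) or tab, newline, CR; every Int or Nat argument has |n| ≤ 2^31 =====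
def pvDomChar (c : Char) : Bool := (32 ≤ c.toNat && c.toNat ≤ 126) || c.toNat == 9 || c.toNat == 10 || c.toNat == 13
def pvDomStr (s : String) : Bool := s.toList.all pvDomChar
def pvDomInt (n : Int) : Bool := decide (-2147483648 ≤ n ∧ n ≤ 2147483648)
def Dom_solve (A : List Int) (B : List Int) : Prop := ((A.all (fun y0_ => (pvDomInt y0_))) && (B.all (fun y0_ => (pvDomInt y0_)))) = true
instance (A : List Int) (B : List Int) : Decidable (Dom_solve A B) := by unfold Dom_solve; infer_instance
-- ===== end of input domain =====

-- B replaces A's per-query expansion with Manacher's algorithm: one pass precomputes the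
-- odd-palindrome count for every center, then each query is a table lookup.

-- ===== PORT A =====
-- the 'while left >= 0 and right < len(A)' expansion loop of A, verbatim
def expandA (A : List Int) (left right count : Int) : Int :=
  if _h : 0 ≤ left ∧ right < (A.length : Int) then
    if PySem.List.pyGet? A left = PySem.List.pyGet? A right then
      expandA A (left - 1) (right + 1) (count + 2)
    else count
  else count
termination_by ((A.length : Int) - right).toNat
decreasing_by omega

def solve (A : List Int) (B : List Int) : List Int :=
  B.foldl (fun results query => results ++ [expandA A ((query - 1) - 1) ((query - 1) + 1) 1]) []

-- ===== PORT B =====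
-- Source B's inner 'while k <= i and i + k < n and A[i-k] == A[i+k]' loop; both indices are
-- in range when read (guarded by 'k <= i' and 'i + k < n'), so pyGetD is exact there
def expandB (A : List Int) (i : Nat) (k : Int) : Int :=
  if _h : k ≤ (i : Int) ∧ (i : Int) + k < (A.length : Int) ∧
      PySem.List.pyGetD A ((i : Int) - k) 0 = PySem.List.pyGetD A ((i : Int) + k) 0 then
    expandB A i (k + 1)
  else k
termination_by ((A.length : Int) - ((i : Int) + k)).toNat
decreasing_by omega

-- one iteration of Source B's 'for i in range(n)' over the state (d, l, r)
def manacherStep (A : List Int) (st : List Int × Int × Int) (i : Nat) : List Int × Int × Int :=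
  let d := st.1
  let l := st.2.1
  let r := st.2.2
  let k0 : Int := if r < (i : Int) then 1 else min (PySem.List.pyGetD d (l + r - (i : Int)) 0) (r - (i : Int) + 1)
  let k := expandB A i k0
  let d' := d.set i k
  if r < (i : Int) + k - 1 then (d', (i : Int) - k + 1, (i : Int) + k - 1) else (d', l, r)

def solve_alt (A : List Int) (B : List Int) : List Int :=
  let n := A.length
  let st := (List.range n).foldl (manacherStep A) (List.replicate n 0, 0, -1)
  B.map (fun q => if 1 ≤ q ∧ q ≤ (n : Int) then 2 * PySem.List.pyGetD st.1 (q - 1) 0 - 1 else 1)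

-- ===== PRECONDITION & SPEC =====
def Spec_solve (A : List Int) (B : List Int) (out : List Int) : Prop := out = solve_alt A B
instance (A : List Int) (B : List Int) (out : List Int) : Decidable (Spec_solve A B out) := by unfold Spec_solve; infer_instance

-- ===== CLAIM (what is proved, stated in full; the proofs are below) =====
def Claim_equal_solve : Prop := ∀ (A : List Int) (B : List Int), Dom_solve A B → Spec_solve A B (solve A B)

-- ===== LEMMAS AND PROOFS =====

-- goodB A i k: the k characters on each side of center i match (A[i-j] = A[i+j] for 1 ≤ j ≤ k)
def goodB (A : List Int) (i k : Nat) : Bool :=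
  decide (k ≤ i) && decide (i + k < A.length) &&
    (List.range k).all (fun j => A.getD (i - (j + 1)) 0 == A.getD (i + (j + 1)) 0)

-- rad A i: the exact palindrome radius at center i
def rad (A : List Int) (i : Nat) : Nat := Nat.findGreatest (fun k => goodB A i k = true) i

theorem good_bounds {A : List Int} {i k : Nat} (h : goodB A i k = true) :
    k ≤ i ∧ i + k < A.length := by
  simp only [goodB, Bool.and_eq_true, decide_eq_true_eq] at h
  exact h.1

theorem good_match {A : List Int} {i k j : Nat} (h : goodB A i k = true)
    (hj1 : 1 ≤ j) (hjk : j ≤ k) : A.getD (i - j) 0 = A.getD (i + j) 0 := by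
  simp only [goodB, Bool.and_eq_true, decide_eq_true_eq, List.all_eq_true, List.mem_range,
    beq_iff_eq] at h
  have h2 := h.2 (j - 1) (by omega)
  rwa [show j - 1 + 1 = j by omega] at h2

theorem good_zero {A : List Int} {i : Nat} (h : i < A.length) : goodB A i 0 = true := by
  simp [goodB, h]

theorem good_succ {A : List Int} {i k : Nat} (h : goodB A i k = true)
    (h1 : k + 1 ≤ i) (h2 : i + (k + 1) < A.length)
    (h3 : A.getD (i - (k + 1)) 0 = A.getD (i + (k + 1)) 0) : goodB A i (k + 1) = true := by
  simp only [goodB, Bool.and_eq_true, decide_eq_true_eq, List.all_eq_true, List.mem_range,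
    beq_iff_eq] at h ⊢
  refine ⟨⟨h1, h2⟩, fun j hj => ?_⟩
  rcases Nat.lt_or_ge j k with hk | hk
  · exact h.2 j hk
  · have : j = k := by omega
    subst this; exact h3

theorem rad_good {A : List Int} {i : Nat} (h : i < A.length) : goodB A i (rad A i) = true := by
  have := Nat.findGreatest_spec (P := fun k => goodB A i k = true) (Nat.zero_le i) (good_zero h)
  simpa [rad] using this

theorem le_rad {A : List Int} {i m : Nat} (h : goodB A i m = true) : m ≤ rad A i := by
  unfold rad
  exact Nat.le_findGreatest (good_bounds h).1 h

theorem rad_not {A : List Int} {i : Nat} : goodB A i (rad A i + 1) = false := by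
  cases hg : goodB A i (rad A i + 1)
  · rfl
  · exact absurd (le_rad hg) (by omega)

-- the mirror lemma: inside a known palindromic window [cen-rad cen, cen+rad cen], the
-- radius at i is at least min (rad at the mirrored center) (distance to the right edge)
theorem mirror (A : List Int) (cen i : Nat) (hcn : cen < A.length) (hci : cen < i)
    (hir : i ≤ cen + rad A cen) :
    goodB A i (min (rad A (2 * cen - i)) (cen + rad A cen - i)) = true := by
  have hbc := good_bounds (rad_good (A := A) (i := cen) hcn)
  set ρ := rad A cen with hρ
  set i' := 2 * cen - i with hi'
  have hi'n : i' < A.length := by omega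
  have hgm := rad_good (A := A) (i := i') hi'n
  have hbm := good_bounds hgm
  set ρ' := rad A i' with hρ'
  set m := min ρ' (cen + ρ - i) with hm
  have hmle : m ≤ cen + ρ - i := by omega
  simp only [goodB, Bool.and_eq_true, decide_eq_true_eq, List.all_eq_true, List.mem_range,
    beq_iff_eq]
  refine ⟨⟨by omega, by omega⟩, fun j0 hj0 => ?_⟩
  set j := j0 + 1 with hj
  have hj1 : 1 ≤ j := by omega
  have hjm : j ≤ m := by omega
  have step1 : A.getD (i + j) 0 = A.getD (i' - j) 0 := by
    have h1 := good_match (rad_good hcn) (j := i + j - cen) (by omega) (by omega)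
    rw [show cen - (i + j - cen) = i' - j by omega,
      show cen + (i + j - cen) = i + j by omega] at h1
    exact h1.symm
  have step2 : A.getD (i' - j) 0 = A.getD (i' + j) 0 :=
    good_match hgm hj1 (by omega)
  have step3 : A.getD (i' + j) 0 = A.getD (i - j) 0 := by
    rcases Nat.lt_or_ge (i' + j) cen with hlt | hge
    · have h1 := good_match (rad_good hcn) (j := cen - (i' + j)) (by omega) (by omega)
      rw [show cen - (cen - (i' + j)) = i' + j by omega,
        show cen + (cen - (i' + j)) = i - j by omega] at h1
      exact h1
    · rcases Nat.eq_or_lt_of_le hge with heq | hgt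
      · rw [show i' + j = cen by omega, show i - j = cen by omega]
      · have h1 := good_match (rad_good hcn) (j := i' + j - cen) (by omega) (by omega)
        rw [show cen + (i' + j - cen) = i' + j by omega,
          show cen - (i' + j - cen) = i - j by omega] at h1
        exact h1.symm
  exact ((step1.trans step2).trans step3).symm

theorem pyGet_getD {A : List Int} {t : Nat} (h : t < A.length) :
    PySem.List.pyGet? A (t : Int) = some (A.getD t 0) := by
  rw [PySem.List.pyGet?_natCast, List.getElem?_eq_getElem h, List.getD_eq_getElem _ _ h]

theorem expandB_eq (A : List Int) (i : Nat) (hin : i < A.length) :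
    ∀ m (k : Nat), m = rad A i + 1 - k → 1 ≤ k → k ≤ rad A i + 1 →
      expandB A i (k : Int) = (rad A i : Int) + 1 := by
  have hb := good_bounds (rad_good (A := A) (i := i) hin)
  intro m
  induction m with
  | zero =>
    intro k hm h1 hk
    have hkr : k = rad A i + 1 := by omega
    rw [expandB, dif_neg, hkr]
    · push_cast; ring
    · rintro ⟨hc1, hc2, hc3⟩
      have hki : k ≤ i := by omega
      have hkn : i + k < A.length := by omega
      rw [show (i : Int) - k = ((i - k : Nat) : Int) by omega,
        show (i : Int) + k = ((i + k : Nat) : Int) by push_cast; ring,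
        PySem.List.pyGetD_natCast, PySem.List.pyGetD_natCast] at hc3
      have hgs := good_succ (rad_good hin) (by omega) (by omega)
        (by rw [show i - (rad A i + 1) = i - k by omega, show i + (rad A i + 1) = i + k by omega]
            exact hc3)
      rw [rad_not] at hgs
      exact Bool.false_ne_true hgs
  | succ m ih =>
    intro k hm h1 hk
    have hkr : k ≤ rad A i := by omega
    rw [expandB, dif_pos, show (k : Int) + 1 = ((k + 1 : Nat) : Int) by push_cast; ring]
    · exact ih (k + 1) (by omega) (by omega) (by omega)
    · refine ⟨by omega, by omega, ?_⟩
      rw [show (i : Int) - k = ((i - k : Nat) : Int) by omega,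
        show (i : Int) + k = ((i + k : Nat) : Int) by push_cast; ring,
        PySem.List.pyGetD_natCast, PySem.List.pyGetD_natCast]
      exact good_match (rad_good hin) h1 hkr

theorem expandA_eq (A : List Int) (c : Nat) (hc : c < A.length) :
    ∀ m (j : Nat) (cnt : Int), m = rad A c - j → j ≤ rad A c →
      expandA A ((c : Int) - 1 - j) ((c : Int) + 1 + j) cnt = cnt + 2 * ((rad A c : Int) - j) := by
  have hb := good_bounds (rad_good (A := A) (i := c) hc)
  intro m
  induction m with
  | zero =>
    intro j cnt hm hj
    have hjr : j = rad A c := by omega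
    subst hjr
    rw [expandA]
    by_cases hcond : 0 ≤ (c : Int) - 1 - (rad A c) ∧ (c : Int) + 1 + (rad A c) < (A.length : Int)
    · rw [dif_pos hcond]
      have hl : c - (rad A c + 1) < A.length := by omega
      have hr : c + (rad A c + 1) < A.length := by omega
      rw [show (c : Int) - 1 - (rad A c) = ((c - (rad A c + 1) : Nat) : Int) by omega,
        show (c : Int) + 1 + (rad A c) = ((c + (rad A c + 1) : Nat) : Int) by push_cast; ring,
        pyGet_getD hl, pyGet_getD hr, if_neg, sub_self, mul_zero, add_zero]
      intro hsome
      have heq : A.getD (c - (rad A c + 1)) 0 = A.getD (c + (rad A c + 1)) 0 :=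
        Option.some.inj hsome
      have hgs := good_succ (rad_good hc) (by omega) (by omega) heq
      rw [rad_not] at hgs
      exact Bool.false_ne_true hgs
    · rw [dif_neg hcond, sub_self, mul_zero, add_zero]
  | succ m ih =>
    intro j cnt hm hj
    have hjr : j < rad A c := by omega
    rw [expandA]
    have hcond : 0 ≤ (c : Int) - 1 - j ∧ (c : Int) + 1 + j < (A.length : Int) := by
      constructor <;> omega
    rw [dif_pos hcond]
    have hl : c - (j + 1) < A.length := by omega
    have hr : c + (j + 1) < A.length := by omega
    rw [show (c : Int) - 1 - j = ((c - (j + 1) : Nat) : Int) by omega,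
      show (c : Int) + 1 + j = ((c + (j + 1) : Nat) : Int) by push_cast; ring,
      pyGet_getD hl, pyGet_getD hr,
      if_pos (congrArg some (good_match (rad_good hc) (by omega) (by omega))),
      show ((c - (j + 1) : Nat) : Int) - 1 = (c : Int) - 1 - ((j + 1 : Nat) : Int) by omega,
      show ((c + (j + 1) : Nat) : Int) + 1 = (c : Int) + 1 + ((j + 1 : Nat) : Int) by push_cast; ring,
      ih (j + 1) (cnt + 2) (by omega) (by omega)]
    push_cast
    ring

-- the loop invariant of Source B's main for-loop
def MInv (A : List Int) (i : Nat) (st : List Int × Int × Int) : Prop :=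
  st.1 = (List.range A.length).map (fun j => if j < i then ((rad A j : Int) + 1) else 0) ∧
  st.2.2 < (A.length : Int) ∧
  ((i : Int) ≤ st.2.2 → ∃ cen : Nat, cen < i ∧ st.2.1 = (cen : Int) - (rad A cen : Int) ∧
    st.2.2 = (cen : Int) + (rad A cen : Int))

theorem inv_step (A : List Int) (i : Nat) (st : List Int × Int × Int) (hin : i < A.length)
    (h : MInv A i st) : MInv A (i + 1) (manacherStep A st i) := by
  obtain ⟨d, l, r⟩ := st
  obtain ⟨hd, hrn, hcen⟩ := h
  dsimp only at hd hrn hcen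
  have hbi := good_bounds (rad_good (A := A) (i := i) hin)
  -- the starting k of the while loop is a Nat in [1, rad A i + 1]
  have hk0 : ∃ k0 : Nat,
      (if r < (i : Int) then (1 : Int)
        else min (PySem.List.pyGetD d (l + r - (i : Int)) 0) (r - (i : Int) + 1)) = (k0 : Int) ∧
      1 ≤ k0 ∧ k0 ≤ rad A i + 1 := by
    by_cases hri : r < (i : Int)
    · exact ⟨1, by rw [if_pos hri]; norm_num, by omega, by omega⟩
    · obtain ⟨cen, hcenlt, hl, hr⟩ := hcen (by omega)
      have hcn : cen < A.length := by omega
      have hgc := good_bounds (rad_good (A := A) (i := cen) hcn)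
      have hiub : i ≤ cen + rad A cen := by omega
      have hρc : rad A cen ≤ cen := hgc.1
      have hidx : l + r - (i : Int) = ((2 * cen - i : Nat) : Int) := by omega
      have hi'lt : 2 * cen - i < i := by omega
      have hi'n : 2 * cen - i < A.length := by omega
      have hdl : PySem.List.pyGetD d (l + r - (i : Int)) 0 = (rad A (2 * cen - i) : Int) + 1 := by
        rw [hidx, PySem.List.pyGetD_natCast, hd,
          List.getD_eq_getElem _ _ (by simpa using hi'n)]
        simp [hi'lt]
      have hle := le_rad (mirror A cen i hcn hcenlt hiub)
      refine ⟨min (rad A (2 * cen - i)) (cen + rad A cen - i) + 1, ?_, by omega, by omega⟩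
      rw [if_neg hri, hdl]
      have hre : r - (i : Int) + 1 = ((cen + rad A cen - i : Nat) : Int) + 1 := by omega
      rw [hre]
      push_cast
      omega
  obtain ⟨k0, hk0eq, hk01, hk0le⟩ := hk0
  have hk := expandB_eq A i hin (rad A i + 1 - k0) k0 rfl hk01 hk0le
  have hdset : d.set i ((rad A i : Int) + 1)
      = (List.range A.length).map (fun j => if j < i + 1 then ((rad A j : Int) + 1) else 0) := by
    rw [hd]
    apply List.ext_getElem (by simp)
    intro j hj1 hj2
    simp only [List.getElem_set, List.getElem_map, List.getElem_range]
    rcases eq_or_ne i j with rfl | hne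
    · simp
    · rw [if_neg hne]
      by_cases hji : j < i
      · rw [if_pos hji, if_pos (by omega)]
      · rw [if_neg hji, if_neg (by omega)]
  unfold manacherStep
  dsimp only
  rw [hk0eq, hk]
  by_cases hbr : r < (i : Int) + ((rad A i : Int) + 1) - 1
  · rw [if_pos hbr]
    refine ⟨hdset, by dsimp only; omega, ?_⟩
    intro _
    exact ⟨i, by omega, by dsimp only; ring, by dsimp only; ring⟩
  · rw [if_neg hbr]
    refine ⟨hdset, hrn, ?_⟩
    intro hi1
    obtain ⟨cen, hcenlt, hl, hr⟩ := hcen (by dsimp only at hi1; omega)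
    exact ⟨cen, by omega, hl, hr⟩

theorem inv_fold (A : List Int) :
    ∀ k, k ≤ A.length → MInv A k ((List.range k).foldl (manacherStep A)
      (List.replicate A.length 0, 0, -1)) := by
  intro k
  induction k with
  | zero =>
    intro _
    simp only [List.range_zero, List.foldl_nil]
    unfold MInv
    dsimp only
    refine ⟨by simp, by omega, fun h => absurd h (by omega)⟩
  | succ k ih =>
    intro hk
    rw [List.range_succ, List.foldl_append, List.foldl_cons, List.foldl_nil]
    exact inv_step A k _ (by omega) (ih (by omega))

theorem per_query (A : List Int) (q : Int) :
    expandA A ((q - 1) - 1) ((q - 1) + 1) 1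
      = (if 1 ≤ q ∧ q ≤ (A.length : Int) then
          2 * PySem.List.pyGetD ((List.range A.length).foldl (manacherStep A)
            (List.replicate A.length 0, 0, -1)).1 (q - 1) 0 - 1
        else 1) := by
  by_cases h : 1 ≤ q ∧ q ≤ (A.length : Int)
  · obtain ⟨c, hcq⟩ : ∃ c : Nat, q - 1 = (c : Int) :=
      ⟨(q - 1).toNat, (Int.toNat_of_nonneg (by omega)).symm⟩
    have hc : c < A.length := by omega
    obtain ⟨hd, -, -⟩ := inv_fold A A.length le_rfl
    rw [if_pos h, hcq, hd, PySem.List.pyGetD_natCast]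
    have hlu : ((List.range A.length).map
        (fun j => if j < A.length then ((rad A j : Int) + 1) else 0)).getD c 0
        = (rad A c : Int) + 1 := by
      rw [List.getD_eq_getElem _ _ (by simpa using hc)]
      simp [hc]
    rw [hlu]
    have hexp := expandA_eq A c hc (rad A c) 0 1 (by omega) (by omega)
    simp only [Nat.cast_zero, Int.sub_zero, Int.add_zero] at hexp
    rw [hexp]
    ring
  · rw [if_neg h]
    rw [expandA]
    have hneg : ¬ (0 ≤ q - 1 - 1 ∧ q - 1 + 1 < (A.length : Int)) := by
      intro hcond; exact h ⟨by omega, by omega⟩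
    rw [dif_neg hneg]

-- ===== VERDICT (by name: the statement is the Claim_ definition above) =====
theorem solve_spec : Claim_equal_solve := by
  intro A B _
  unfold Spec_solve solve solve_alt
  dsimp only
  rw [PySem.List.foldl_append_singleton_eq_map]
  simp only [List.nil_append]
  apply List.map_congr_left
  intro q _
  exact per_query A q
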